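-- pv_equiv track=rewrite | github.com/rmfulton/BenjaminProblem | solution.py | get_all_pairs_that_add_to_s
-- ===== SOURCE A (Python) =====
-- def get_all_pairs_that_add_to_s(pairs):
--     allPairsThatAddToS = dict()
--     for pair in pairs:
--         s = pair[0]+pair[1]
--         if s not in allPairsThatAddToS:
--             allPairsThatAddToS[s] = []
--         allPairsThatAddToS[s].append(pair)
--     return allPairsThatAddToS
-- ===== SOURCE B (Python) =====
-- def get_all_pairs_that_add_to_s(pairs):
--     sums = list(dict.fromkeys(a + b for a, b in pairs))
--     return {s: [p for p in pairs if p[0] + p[1] == s] for s in sums}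
-- ===== Notes on version B (the rewrite author's own statement) =====
-- stated objective: simpler
-- what changed: Replaces A's single-pass mutable-dict accumulation with a two-phase declarative build: dedup the list of sums in first-occurrence order, then construct the dict by one filter comprehension per distinct sum.
import Mathlib
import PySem

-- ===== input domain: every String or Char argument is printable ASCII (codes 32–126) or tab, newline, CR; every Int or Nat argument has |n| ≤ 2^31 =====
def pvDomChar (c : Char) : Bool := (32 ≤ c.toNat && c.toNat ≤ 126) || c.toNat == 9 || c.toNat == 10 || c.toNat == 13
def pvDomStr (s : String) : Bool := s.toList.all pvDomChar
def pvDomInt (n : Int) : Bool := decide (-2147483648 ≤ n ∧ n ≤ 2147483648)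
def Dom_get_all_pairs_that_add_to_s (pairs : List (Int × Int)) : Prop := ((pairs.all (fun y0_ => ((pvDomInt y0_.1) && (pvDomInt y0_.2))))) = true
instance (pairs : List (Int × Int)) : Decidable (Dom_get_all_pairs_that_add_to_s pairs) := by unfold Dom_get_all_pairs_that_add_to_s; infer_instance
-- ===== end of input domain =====

-- B replaces A's one-pass mutable-dict accumulation with a two-phase build (dedup the
-- sums, then one filter per distinct sum) — simpler/declarative, not faster.

-- ===== PORT A =====
-- dict accumulation: if s not in d: d[s] = []; d[s].append(pair); return the dict (items list)
def get_all_pairs_that_add_to_s (pairs : List (Int × Int)) : List (Int × List (Int × Int)) :=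
  (pairs.foldl (fun d pair =>
      let s := pair.1 + pair.2
      let d := if d.contains s then d else d.insert s []
      d.modify s [] (fun l => l ++ [pair]))
    PySem.Dict.empty).items

-- ===== PORT B =====
-- sums = list(dict.fromkeys(a+b for a,b in pairs)); {s: [p for p in pairs if p[0]+p[1]==s] for s in sums}
def get_all_pairs_that_add_to_s_alt (pairs : List (Int × Int)) : List (Int × List (Int × Int)) :=
  let sums := PySem.List.dedup (pairs.map (fun p => p.1 + p.2))
  sums.map (fun s => (s, pairs.filter (fun p => p.1 + p.2 == s)))

-- ===== PRECONDITION & SPEC =====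
def Spec_get_all_pairs_that_add_to_s (pairs : List (Int × Int)) (out : List (Int × List (Int × Int))) : Prop := out = get_all_pairs_that_add_to_s_alt pairs
instance (pairs : List (Int × Int)) (out : List (Int × List (Int × Int))) : Decidable (Spec_get_all_pairs_that_add_to_s pairs out) := by unfold Spec_get_all_pairs_that_add_to_s; infer_instance

-- ===== CLAIM (what is proved, stated in full; the proofs are below) =====
def Claim_equal_get_all_pairs_that_add_to_s : Prop := ∀ (pairs : List (Int × Int)), Dom_get_all_pairs_that_add_to_s pairs → Spec_get_all_pairs_that_add_to_s pairs (get_all_pairs_that_add_to_s pairs)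

-- ===== LEMMAS AND PROOFS =====

-- lookup of an absent key, before and after appending (s, []) at the end
theorem getD_absent (s : Int) (its : List (Int × List (Int × Int)))
    (h : ∀ p ∈ its, (p.1 == s) = false) :
    (PySem.Dict.mk (its ++ [(s, [])])).getD s [] = [] ∧ (PySem.Dict.mk its).getD s [] = [] := by
  induction its with
  | nil => simp [PySem.Dict.getD, PySem.Dict.get?]
  | cons hd tl ih =>
    obtain ⟨k, v⟩ := hd
    have hhd := h (k, v) (by simp)
    have := ih (fun p hp => h p (by simp [hp]))
    simp only [PySem.Dict.getD_eq_get?_getD] at this ⊢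
    rw [List.cons_append, PySem.Dict.get?_mk_cons, PySem.Dict.get?_mk_cons]
    simp only [hhd] at *
    exact this

-- A's loop body (conditional insert of [] then append) is one Dict.modify.
theorem step_eq_modify (d : PySem.Dict Int (List (Int × Int))) (pair : Int × Int) :
    (let s := pair.1 + pair.2
     let d := if d.contains s then d else d.insert s []
     d.modify s [] (fun l => l ++ [pair]))
    = d.modify (pair.1 + pair.2) [] (fun l => l ++ [pair]) := by
  by_cases h : d.contains (pair.1 + pair.2)
  · simp [h]
  · simp only [h]
    cases d with
    | mk items =>
      simp only [PySem.Dict.contains, List.any_eq_true, not_exists] at h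
      have habs : ∀ p ∈ items, (p.1 == pair.1 + pair.2) = false := by
        intro p hp
        have hnp := h p
        simp only [hp, true_and] at hnp
        simpa using hnp
      have hany : (items.any fun p => p.1 == pair.1 + pair.2) = false :=
        List.any_eq_false.mpr (by intro p hp; simp [habs p hp])
      obtain ⟨h1, h2⟩ := getD_absent (pair.1 + pair.2) items habs
      simp [PySem.Dict.insert, PySem.Dict.modify, PySem.Dict.contains, hany]
      constructor
      · have : ∀ p ∈ items,
            (if p.1 = pair.1 + pair.2 then
              (pair.1 + pair.2, (PySem.Dict.mk (items ++ [(pair.1 + pair.2, [])])).getD (pair.1 + pair.2) [] ++ [pair])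
            else p) = p := by
          intro p hp
          have := habs p hp
          simp_all
        simp [List.map_congr_left this]
      · rw [h1, h2]

theorem foldl_step_eq (pairs : List (Int × Int)) (d : PySem.Dict Int (List (Int × Int))) :
    pairs.foldl (fun d pair =>
      let s := pair.1 + pair.2
      let d := if d.contains s then d else d.insert s []
      d.modify s [] (fun l => l ++ [pair])) d
    = (pairs.map (fun p => (p.1 + p.2, p))).foldl
        (fun d q => d.modify q.1 [] (fun l => l ++ [q.2])) d := by
  rw [List.foldl_map]
  apply PySem.List.foldl_congr_mem
  intro acc x _
  exact step_eq_modify acc x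

-- ===== VERDICT (by name: the statement is the Claim_ definition above) =====
theorem get_all_pairs_that_add_to_s_spec : Claim_equal_get_all_pairs_that_add_to_s := by
  intro pairs _
  unfold Spec_get_all_pairs_that_add_to_s get_all_pairs_that_add_to_s get_all_pairs_that_add_to_s_alt
  rw [foldl_step_eq]
  set l := pairs.map (fun p => (p.1 + p.2, p)) with hl
  set D := l.foldl (fun d q => d.modify q.1 [] (fun l => l ++ [q.2])) PySem.Dict.empty with hD
  have hnd : D.keys.Nodup := by
    apply PySem.Dict.nodup_keys_foldl_modify_key
    simp
  have hkeys : D.keys = PySem.List.dedup (pairs.map (fun p => p.1 + p.2)) := by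
    rw [hD, PySem.Dict.keys_foldl_modify_key]
    simp [hl, PySem.List.dedup_eq_ofList, PySem.Set.update, PySem.Set.ofList_eq_foldl,
      PySem.Dict.keys_empty, List.map_map, Function.comp_def]
  rw [PySem.Dict.items_eq_map_keys D hnd []]
  rw [hkeys]
  apply List.map_congr_left
  intro s _
  have hg := PySem.Dict.getD_foldl_modify_append (l := l) (d := PySem.Dict.empty) (c := s)
  rw [hD, hg]
  simp only [hl, List.filter_map, List.map_map]
  simp [Function.comp_def]
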